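-- pv_equiv track=rewrite | github.com/eliottcassidy2000/math | 04-computation/multivariable_schur.py | get_circulants
-- ===== SOURCE A (Python) =====
-- from itertools import combinations
--
-- def get_circulants(p):
--     """Get all circulant tournaments on Z_p with connection set S."""
--     n = (p - 1) // 2
--     results = []
--     for bits in range(1, 2**n):  # exclude empty set
--         S = set()
--         for i in range(n):
--             if bits & (1 << i):
--                 S.add(i + 1)
--         # Complete the connection set: if j in S, then p-j not in S
--         valid = True
--         for j in S:
--             if (p - j) % p in S:
--                 valid = False
--                 break
--         if valid:
--             # Add complementary elements
--             full_S = set(S)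
--             for j in range(1, p):
--                 if j not in full_S and (p - j) % p not in full_S:
--                     pass  # neither j nor p-j is in S yet
--             results.append(frozenset(S))
--
--     # Actually: enumerate all connection sets of size (p-1)/2
--     # where S and Z_p\(S∪{0}) partition {1,...,p-1}
--     results = []
--     elems = list(range(1, p))
--     for S in combinations(elems, n):
--         S_set = set(S)
--         # Check: for each j in S, p-j should NOT be in S
--         valid = True
--         for j in S_set:
--             if (p - j) % p in S_set:
--                 valid = False
--                 break
--         if valid:
--             results.append(frozenset(S_set))
--     return results
-- ===== SOURCE B (Python) =====
-- def get_circulants(p):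
--     """Get all circulant tournaments on Z_p with connection set S.
--
--     A valid connection set picks, for each pair {j, p-j} with 1 <= j <= (p-1)//2,
--     exactly one of the two elements.  Enumerate the 2**n choice vectors by a
--     depth-first recursion (choosing the small element j first), which yields the
--     sets directly in the same order as lexicographic enumeration of the sorted
--     tuples, with no filtering and no sorting.
--     """
--     n = (p - 1) // 2
--
--     def build(j, bits):
--         # sorted elements of the set chosen by `bits` for pairs j, j+1, ...
--         if not bits:
--             return []
--         if bits[0]:
--             return [j] + build(j + 1, bits[1:])
--         return build(j + 1, bits[1:]) + [p - j]
--
--     def gen(prefix, k):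
--         if k == 0:
--             return [frozenset(build(1, prefix))]
--         return gen(prefix + [True], k - 1) + gen(prefix + [False], k - 1)
--
--     return gen([], n)
-- ===== Notes on version B (the rewrite author's own statement) =====
-- stated objective: faster
-- what changed: A scans all C(p-1,n) n-subsets of {1,...,p-1} with itertools.combinations and filters out those containing both j and p-j; B generates exactly the 2^n valid connection sets by choosing one element of each pair {j,p-j} in a depth-first recursion that emits them directly in A's lexicographic order, with no filtering and no sorting.
import Mathlib
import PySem

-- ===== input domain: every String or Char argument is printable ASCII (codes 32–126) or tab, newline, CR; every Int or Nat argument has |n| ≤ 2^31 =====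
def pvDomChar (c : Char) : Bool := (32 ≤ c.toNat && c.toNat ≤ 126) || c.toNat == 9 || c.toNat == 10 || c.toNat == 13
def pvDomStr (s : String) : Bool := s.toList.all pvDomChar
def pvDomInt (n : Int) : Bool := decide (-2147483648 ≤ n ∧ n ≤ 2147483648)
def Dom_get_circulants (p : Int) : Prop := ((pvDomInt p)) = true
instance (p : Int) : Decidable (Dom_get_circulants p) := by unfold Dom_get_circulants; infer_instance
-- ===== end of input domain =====

-- B replaces A's filtered scan of all C(p-1,n) n-subsets by a direct recursive
-- enumeration of the 2^n one-element-per-pair choices, emitted already in A's order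
-- (a timing run measures the speed-up; equivalence is proved below on Pre_ = {p ≥ 1}).

-- ===== PORT A =====
-- A's first for-loop is dead code: its `results` is rebound to [] before use, so it is
-- not ported; for p ≤ 0 that loop's range(1, 2**n) raises TypeError (excluded by Pre_),
-- and `.toNat` below is likewise only reached with n ≥ 0 under Pre_.
def pvValidA (p : Int) (Sset : PySem.Set Int) : Bool :=
  Sset.all (fun j => !(PySem.Set.contains Sset (PySem.Int.mod (p - j) p)))

def get_circulants (p : Int) : List (List Int) :=
  let n : Nat := (PySem.Int.floordiv (p - 1) 2).toNat
  let elems := PySem.List.pyRange 1 p 1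
  (PySem.List.combinations elems n).foldl
    (fun results S =>
      let Sset : PySem.Set Int := PySem.Set.ofList S
      if pvValidA p Sset then results ++ [Sset] else results) []

-- ===== PORT B =====
-- Source B's `build(j, bits)`: the sorted connection set selected by `bits` for pairs j, j+1, …
def pvBuild (p : Int) : Int → List Bool → List Int
  | _, [] => []
  | j, true :: bs => j :: pvBuild p (j + 1) bs
  | j, false :: bs => pvBuild p (j + 1) bs ++ [p - j]

-- Source B's `gen(prefix, k)`: depth-first enumeration of the 2^k completions of `prefix`
def pvGen (p : Int) : List Bool → Nat → List (List Int)
  | pre, 0 => [PySem.Set.ofList (pvBuild p 1 pre)]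
  | pre, k + 1 => pvGen p (pre ++ [true]) k ++ pvGen p (pre ++ [false]) k

def get_circulants_alt (p : Int) : List (List Int) :=
  pvGen p [] ((PySem.Int.floordiv (p - 1) 2).toNat)

-- ===== PRECONDITION & SPEC =====
-- Pre_ excludes exactly p ≤ 0, where A raises TypeError (range(1, 2**n) with negative n).
def Pre_get_circulants (p : Int) : Prop := 0 < p
instance (p : Int) : Decidable (Pre_get_circulants p) := by unfold Pre_get_circulants; infer_instance

def pvWitness_get_circulants : Int := (5)

def Spec_get_circulants (p : Int) (out : List (List Int)) : Prop := out = get_circulants_alt p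
instance (p : Int) (out : List (List Int)) : Decidable (Spec_get_circulants p out) := by unfold Spec_get_circulants; infer_instance

-- ===== CLAIM (what is proved, stated in full; the proofs are below) =====
def Claim_equal_get_circulants : Prop := ∀ (p : Int), Dom_get_circulants p → Pre_get_circulants p → Spec_get_circulants p (get_circulants p)

-- ===== LEMMAS AND PROOFS =====

-- All length-k bit vectors in B's (depth-first, true-first) order
def pvBV : Nat → List (List Bool)
  | 0 => [[]]
  | k + 1 => (pvBV k).map (true :: ·) ++ (pvBV k).map (false :: ·)

theorem pvBV_mem (b : List Bool) : ∀ (k : Nat), b ∈ pvBV k ↔ b.length = k := by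
  induction b with
  | nil =>
    intro k; cases k with
    | zero => simp [pvBV]
    | succ k => simp [pvBV]
  | cons t bs ih =>
    intro k; cases k with
    | zero => simp [pvBV]
    | succ k =>
      simp only [pvBV, List.mem_append, List.mem_map, List.length_cons]
      constructor
      · rintro (⟨b', hb', h⟩ | ⟨b', hb', h⟩) <;>
          · cases h; rw [(ih k).mp hb']
      · intro h
        cases t
        · right; exact ⟨bs, (ih k).mpr (by omega), rfl⟩
        · left; exact ⟨bs, (ih k).mpr (by omega), rfl⟩

theorem pvGen_eq (p : Int) : ∀ (k : Nat) (pre : List Bool),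
    pvGen p pre k = (pvBV k).map (fun b => PySem.Set.ofList (pvBuild p 1 (pre ++ b))) := by
  intro k
  induction k with
  | zero => intro pre; simp [pvGen, pvBV]
  | succ k ih =>
    intro pre
    simp only [pvGen, pvBV, List.map_append, List.map_map, ih]
    congr 1 <;> · apply List.map_congr_left; intro b _; simp [List.append_assoc]

theorem pvBuild_length (p : Int) : ∀ (bs : List Bool) (j : Int), (pvBuild p j bs).length = bs.length := by
  intro bs
  induction bs with
  | nil => intro j; simp [pvBuild]
  | cons t bs ih =>
    intro j; cases t <;> simp [pvBuild, ih]

theorem pvBuild_mem (p x : Int) : ∀ (bs : List Bool) (j : Int),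
    x ∈ pvBuild p j bs ↔
      (∃ i : Nat, bs[i]? = some true ∧ x = j + i) ∨
      (∃ i : Nat, bs[i]? = some false ∧ x = p - (j + i)) := by
  intro bs
  induction bs with
  | nil => intro j; simp [pvBuild]
  | cons t bs ih =>
    intro j
    have hsucc : ∀ (b : Bool) (P : Nat → Prop),
        (∃ i : Nat, (t :: bs)[i]? = some b ∧ P i) ↔
        ((t = b ∧ P 0) ∨ (∃ i : Nat, bs[i]? = some b ∧ P (i + 1))) := by
      intro b P
      constructor
      · rintro ⟨i, hi, hP⟩
        cases i with
        | zero => left; simp at hi; exact ⟨hi, hP⟩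
        | succ i => right; exact ⟨i, by simpa using hi, hP⟩
      · rintro (⟨ht, hP⟩ | ⟨i, hi, hP⟩)
        · exact ⟨0, by simp [ht], hP⟩
        · exact ⟨i + 1, by simpa using hi, hP⟩
    rw [hsucc true (fun i => x = j + i), hsucc false (fun i => x = p - (j + i))]
    cases t with
    | true =>
      simp only [pvBuild, List.mem_cons, ih (j + 1)]
      constructor
      · rintro (rfl | (⟨i, hi, rfl⟩ | ⟨i, hi, rfl⟩))
        · exact Or.inl (Or.inl (by simp))
        · exact Or.inl (Or.inr ⟨i, hi, by push_cast; ring⟩)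
        · exact Or.inr (Or.inr ⟨i, hi, by push_cast; ring⟩)
      · rintro ((⟨-, rfl⟩ | ⟨i, hi, rfl⟩) | (⟨hf, -⟩ | ⟨i, hi, rfl⟩))
        · left; simp
        · right; left; exact ⟨i, hi, by push_cast; ring⟩
        · exact absurd hf (by simp)
        · right; right; exact ⟨i, hi, by push_cast; ring⟩
    | false =>
      simp only [pvBuild, List.mem_append, List.mem_singleton, ih (j + 1)]
      constructor
      · rintro ((⟨i, hi, rfl⟩ | ⟨i, hi, rfl⟩) | rfl)
        · exact Or.inl (Or.inr ⟨i, hi, by push_cast; ring⟩)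
        · exact Or.inr (Or.inr ⟨i, hi, by push_cast; ring⟩)
        · exact Or.inr (Or.inl (by simp))
      · rintro ((⟨ht, -⟩ | ⟨i, hi, rfl⟩) | (⟨-, rfl⟩ | ⟨i, hi, rfl⟩))
        · exact absurd ht (by simp)
        · left; left; exact ⟨i, hi, by push_cast; ring⟩
        · right; simp
        · left; right; exact ⟨i, hi, by push_cast; ring⟩

theorem pvBuild_mem_cases {p x : Int} {bs : List Bool} {j : Int}
    (h : x ∈ pvBuild p j bs) :
    (j ≤ x ∧ x < j + bs.length) ∨ (p - j - bs.length < x ∧ x ≤ p - j) := by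
  rcases (pvBuild_mem p x bs j).mp h with ⟨i, hi, rfl⟩ | ⟨i, hi, rfl⟩ <;>
    · have hlt : i < bs.length := by
        rcases List.getElem?_eq_some_iff.mp hi with ⟨h', -⟩; exact h'
      have : (i : Int) < (bs.length : Int) := by exact_mod_cast hlt
      have : (0 : Int) ≤ (i : Int) := Int.natCast_nonneg i
      first
        | (left; omega)
        | (right; omega)

theorem pvBuild_sorted (p : Int) (N : Nat) (hp1 : 2 * (N : Int) + 1 ≤ p) :
    ∀ (bs : List Bool) (j : Int), 1 ≤ j → j + bs.length ≤ (N : Int) + 1 →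
      (pvBuild p j bs).Pairwise (· < ·) := by
  intro bs
  induction bs with
  | nil => intro j _ _; simp [pvBuild]
  | cons t bs ih =>
    intro j hj hlen
    simp only [List.length_cons] at hlen
    have hlen' : (j + 1) + (bs.length : Int) ≤ (N : Int) + 1 := by push_cast at hlen ⊢; omega
    cases t with
    | true =>
      simp only [pvBuild]
      rw [List.pairwise_cons]
      refine ⟨?_, ih (j + 1) (by omega) hlen'⟩
      intro x hx
      rcases pvBuild_mem_cases hx with ⟨h1, h2⟩ | ⟨h1, h2⟩ <;> omega
    | false =>
      simp only [pvBuild]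
      rw [List.pairwise_append]
      refine ⟨ih (j + 1) (by omega) hlen', List.pairwise_singleton _ _, ?_⟩
      intro x hx y hy
      rw [List.mem_singleton] at hy
      subst hy
      rcases pvBuild_mem_cases hx with ⟨h1, h2⟩ | ⟨h1, h2⟩ <;> omega

theorem pvLex_append {s₁ s₂ : List Int} : ∀ {l₁ l₂ : List Int},
    List.Lex (· < ·) l₁ l₂ → l₁.length = l₂.length → List.Lex (· < ·) (l₁ ++ s₁) (l₂ ++ s₂) := by
  intro l₁
  induction l₁ with
  | nil =>
    intro l₂ h hlen
    have : l₂ = [] := by cases l₂ <;> simp_all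
    subst this; cases h
  | cons a as ih =>
    intro l₂ h hlen
    cases l₂ with
    | nil => simp at hlen
    | cons b bs =>
      cases h with
      | cons h' => exact List.Lex.cons (ih h' (by simpa using hlen))
      | rel hab => exact List.Lex.rel hab

theorem pvLex_asymm : ∀ {l₁ l₂ : List Int},
    List.Lex (· < ·) l₁ l₂ → List.Lex (· < ·) l₂ l₁ → False := by
  intro l₁ l₂ h₁
  induction h₁ with
  | nil => intro h₂; cases h₂
  | @cons a as bs h' ih =>
    intro h₂
    cases h₂ with
    | cons h₂' => exact ih h₂'
    | rel hba => exact lt_irrefl _ hba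
  | @rel a as b bs hab =>
    intro h₂
    cases h₂ with
    | cons h₂' => exact lt_irrefl _ hab
    | rel hba => exact lt_irrefl _ (lt_trans hab hba)

theorem pvSortedExt {α : Type} {r : α → α → Prop} (hasymm : ∀ a b, r a b → r b a → False) :
    ∀ (l₁ l₂ : List α), l₁.Pairwise r → l₂.Pairwise r → (∀ x, x ∈ l₁ ↔ x ∈ l₂) → l₁ = l₂ := by
  have hirr : ∀ a, ¬ r a a := fun a h => hasymm a a h h
  intro l₁
  induction l₁ with
  | nil =>
    intro l₂ _ _ hm
    cases l₂ with
    | nil => rfl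
    | cons b bs => exact absurd ((hm b).mpr (List.mem_cons_self)) (List.not_mem_nil)
  | cons a as ih =>
    intro l₂ h₁ h₂ hm
    cases l₂ with
    | nil => exact absurd ((hm a).mp (List.mem_cons_self)) (List.not_mem_nil)
    | cons b bs =>
      rw [List.pairwise_cons] at h₁ h₂
      have hab : a = b := by
        rcases List.mem_cons.mp ((hm a).mp (List.mem_cons_self)) with h | h
        · exact h
        · rcases List.mem_cons.mp ((hm b).mpr (List.mem_cons_self)) with h' | h'
          · exact h'.symm
          · exact absurd (h₂.1 a h) (fun hr => hasymm _ _ hr (h₁.1 b h'))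
      subst hab
      have : as = bs := by
        apply ih bs h₁.2 h₂.2
        intro x
        constructor
        · intro hx
          rcases List.mem_cons.mp ((hm x).mp (List.mem_cons_of_mem _ hx)) with h | h
          · exact absurd (h ▸ h₁.1 x hx) (hirr x)
          · exact h
        · intro hx
          rcases List.mem_cons.mp ((hm x).mpr (List.mem_cons_of_mem _ hx)) with h | h
          · exact absurd (h ▸ h₂.1 x hx) (hirr x)
          · exact h
      rw [this]

theorem pvSortedSublist : ∀ (l₂ l₁ : List Int), l₁.Pairwise (· < ·) → l₂.Pairwise (· < ·) →
    (∀ x ∈ l₁, x ∈ l₂) → l₁.Sublist l₂ := by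
  intro l₂
  induction l₂ with
  | nil =>
    intro l₁ _ _ hm
    cases l₁ with
    | nil => exact List.Sublist.refl _
    | cons a as => exact absurd (hm a List.mem_cons_self) (List.not_mem_nil)
  | cons b bs ih =>
    intro l₁ h₁ h₂ hm
    cases l₁ with
    | nil => exact List.nil_sublist _
    | cons a as =>
      rw [List.pairwise_cons] at h₁ h₂
      by_cases hab : a = b
      · subst hab
        apply List.Sublist.cons₂
        apply ih as h₁.2 h₂.2
        intro x hx
        rcases List.mem_cons.mp (hm x (List.mem_cons_of_mem _ hx)) with h | h
        · exact absurd (h ▸ h₁.1 x hx) (lt_irrefl x)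
        · exact h
      · have hb : a ∈ bs := by
          rcases List.mem_cons.mp (hm a List.mem_cons_self) with h | h
          · exact absurd h hab
          · exact h
        apply List.Sublist.cons
        apply ih (a :: as) (List.pairwise_cons.mpr h₁) h₂.2
        intro x hx
        rcases List.mem_cons.mp hx with rfl | hx'
        · exact hb
        · have hax : a < x := h₁.1 x hx'
          rcases List.mem_cons.mp (hm x (List.mem_cons_of_mem _ hx')) with h | h
          · exact absurd (lt_trans (h₂.1 a hb) hax) (by rw [h]; exact lt_irrefl b)
          · exact h

theorem pvCombs_pairwise : ∀ (xs : List Int), xs.Pairwise (· < ·) →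
    ∀ (k : Nat), (PySem.List.combinations xs k).Pairwise (List.Lex (· < ·)) := by
  intro xs
  induction xs with
  | nil =>
    intro _ k
    cases k with
    | zero => simp [PySem.List.combinations_zero]
    | succ k => simp [PySem.List.combinations_nil_succ]
  | cons x xs ih =>
    intro hxs k
    rw [List.pairwise_cons] at hxs
    obtain ⟨hx, hxs'⟩ := hxs
    cases k with
    | zero => simp [PySem.List.combinations_zero]
    | succ k =>
      rw [PySem.List.combinations_cons_succ, List.pairwise_append]
      refine ⟨?_, ih hxs' (k + 1), ?_⟩
      · rw [List.pairwise_map]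
        exact (ih hxs' k).imp (fun h => List.Lex.cons h)
      · intro a ha c hc
        rcases List.mem_map.mp ha with ⟨a', -, rfl⟩
        have hc' := (PySem.List.mem_combinations_iff xs (k + 1) c).mp hc
        cases c with
        | nil => simp at hc'
        | cons y c' =>
          have hy : y ∈ xs := hc'.1.subset List.mem_cons_self
          exact List.Lex.rel (hx y hy)

theorem pvBuild_lex_key (p : Int) (N : Nat) (hp1 : 2 * (N : Int) + 1 ≤ p) :
    ∀ (pre : List Bool) (j : Int) (u v : List Bool), u.length = v.length → 1 ≤ j →
      j + pre.length + u.length ≤ (N : Int) →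
      List.Lex (· < ·) (pvBuild p j (pre ++ true :: u)) (pvBuild p j (pre ++ false :: v)) := by
  intro pre
  induction pre with
  | nil =>
    intro j u v hlen hj hbound
    simp only [List.length_nil] at hbound
    have hjN : j ≤ (N : Int) := by
      have : (0 : Int) ≤ (u.length : Int) := Int.natCast_nonneg _
      omega
    cases hv : pvBuild p (j + 1) v with
    | nil =>
      simpa [pvBuild, hv] using List.Lex.rel (show j < p - j by omega)
    | cons y ys =>
      have hy : y ∈ pvBuild p (j + 1) v := by rw [hv]; exact List.mem_cons_self
      have hc := pvBuild_mem_cases hy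
      have hvu : (v.length : Int) = (u.length : Int) := by exact_mod_cast hlen.symm
      have hjy : j < y := by rcases hc with ⟨h1, h2⟩ | ⟨h1, h2⟩ <;> omega
      simpa [pvBuild, hv] using List.Lex.rel hjy
  | cons t pre' ih =>
    intro j u v hlen hj hbound
    simp only [List.length_cons] at hbound
    have hb' : (j + 1) + (pre'.length : Int) + u.length ≤ (N : Int) := by
      push_cast at hbound ⊢; omega
    cases t with
    | true =>
      simp only [List.cons_append, pvBuild]
      exact List.Lex.cons (ih (j + 1) u v hlen (by omega) hb')
    | false =>
      simp only [List.cons_append, pvBuild]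
      exact pvLex_append (ih (j + 1) u v hlen (by omega) hb')
        (by simp [pvBuild_length, hlen])

theorem pvGenList_pairwise (p : Int) (N : Nat) (hp1 : 2 * (N : Int) + 1 ≤ p) :
    ∀ (k : Nat) (pre : List Bool), pre.length + k = N →
      ((pvBV k).map (fun b => pvBuild p 1 (pre ++ b))).Pairwise (List.Lex (· < ·)) := by
  intro k
  induction k with
  | zero => intro pre _; simp [pvBV]
  | succ k ih =>
    intro pre hpre
    simp only [pvBV, List.map_append, List.map_map]
    rw [List.pairwise_append]
    refine ⟨?_, ?_, ?_⟩
    · have h := ih (pre ++ [true]) (by simp; omega)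
      simpa [Function.comp_def, List.append_assoc] using h
    · have h := ih (pre ++ [false]) (by simp; omega)
      simpa [Function.comp_def, List.append_assoc] using h
    · intro a ha c hc
      rcases List.mem_map.mp ha with ⟨u, hu, rfl⟩
      rcases List.mem_map.mp hc with ⟨v, hv, rfl⟩
      have hu' : u.length = k := (pvBV_mem u k).mp hu
      have hv' : v.length = k := (pvBV_mem v k).mp hv
      simp only [Function.comp_def]
      exact pvBuild_lex_key p N hp1 pre 1 u v (hu'.trans hv'.symm) (le_refl 1)
        (by omega)

-- the pigeonhole step: a valid n-subset of {1,…,p-1} contains p-j whenever it misses j ∈ {1,…,n}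
theorem pvCount (p : Int) (N : Nat) (hp1 : 2 * (N : Int) + 1 ≤ p) (hp2 : p ≤ 2 * (N : Int) + 2)
    (S : List Int) (hsub : S.Sublist (PySem.List.pyRange 1 p 1)) (hlen : S.length = N)
    (hvalid : ∀ x ∈ S, p - x ∉ S)
    (j : Int) (hj1 : 1 ≤ j) (hjN : j ≤ (N : Int)) (hjS : j ∉ S) : p - j ∈ S := by
  have hnd : S.Pairwise (· < ·) := List.Pairwise.sublist hsub (PySem.List.pairwise_lt_pyRange_one 1 p)
  have hnodup : S.Nodup := hnd.imp (fun h => ne_of_lt h)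
  have hmem : ∀ x ∈ S, 1 ≤ x ∧ x < p := fun x hx =>
    PySem.List.mem_pyRange_one.mp (hsub.subset hx)
  set T := S.toFinset with hT
  set As := T.filter (fun x => x ≤ (N : Int)) with hAs
  set Al := T.filter (fun x => ¬ (x ≤ (N : Int))) with hAl
  have hcards : As.card + Al.card = N := by
    rw [hAs, hAl, Finset.card_filter_add_card_filter_not, hT,
      List.toFinset_card_of_nodup hnodup, hlen]
  set C := (Finset.Icc (1 : Int) (N : Int)).filter (fun x => x ∉ S) with hC
  have hmapsto : ∀ x ∈ Al, p - x ∈ C := by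
    intro x hx
    rw [hAl, Finset.mem_filter, hT, List.mem_toFinset] at hx
    obtain ⟨hxS, hxN⟩ := hx
    obtain ⟨hb1, hb2⟩ := hmem x hxS
    have hnotmid : p - x ≠ x := fun h => hvalid x hxS (h.symm ▸ hxS)
    rw [hC, Finset.mem_filter, Finset.mem_Icc]
    exact ⟨⟨by omega, by omega⟩, hvalid x hxS⟩
  have hinj : Set.InjOn (fun x => p - x) ↑Al := fun a _ b _ h => by
    simp only at h; omega
  have hAsub : As ⊆ Finset.Icc (1 : Int) (N : Int) := by
    intro x hx
    rw [hAs, Finset.mem_filter, hT, List.mem_toFinset] at hx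
    exact Finset.mem_Icc.mpr ⟨(hmem x hx.1).1, hx.2⟩
  have hCeq : C = Finset.Icc (1 : Int) (N : Int) \ As := by
    ext x
    rw [hC, hAs, hT]
    simp only [Finset.mem_filter, Finset.mem_sdiff, Finset.mem_Icc, List.mem_toFinset]
    constructor
    · rintro ⟨hx, hxS⟩; exact ⟨hx, fun h => hxS h.1⟩
    · rintro ⟨hx, hno⟩; exact ⟨hx, fun hS => hno ⟨hS, hx.2⟩⟩
  have hIccN : (Finset.Icc (1 : Int) (N : Int)).card = N := by
    rw [Int.card_Icc]; omega
  have hCcard : C.card = N - As.card := by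
    rw [hCeq, Finset.card_sdiff, Finset.inter_eq_left.mpr hAsub, hIccN]
  have hle : Al.card ≤ C.card :=
    Finset.card_le_card_of_injOn _ (fun x hx => hmapsto x hx) hinj
  have himage : Al.image (fun x => p - x) ⊆ C := by
    intro y hy
    rcases Finset.mem_image.mp hy with ⟨x, hx, rfl⟩
    exact hmapsto x hx
  have hcardeq : C.card ≤ (Al.image (fun x => p - x)).card := by
    rw [Finset.card_image_of_injOn hinj]; omega
  have himeq : Al.image (fun x => p - x) = C := Finset.eq_of_subset_of_card_le himage hcardeq
  have hjC : j ∈ C := by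
    rw [hC, Finset.mem_filter, Finset.mem_Icc]; exact ⟨⟨hj1, hjN⟩, hjS⟩
  rw [← himeq] at hjC
  rcases Finset.mem_image.mp hjC with ⟨x, hxAl, hxj⟩
  have hxj' : p - x = j := hxj
  have hxS : x ∈ S := by
    have := (Finset.mem_filter.mp (hAl ▸ hxAl)).1
    rwa [hT, List.mem_toFinset] at this
  have hxe : x = p - j := by omega
  rwa [← hxe]

theorem pvValidA_iff (p : Int) (S : List Int) (hp : 0 < p) (hmem : ∀ x ∈ S, 1 ≤ x ∧ x < p) :
    pvValidA p S = true ↔ ∀ x ∈ S, p - x ∉ S := by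
  have hmod : ∀ x ∈ S, PySem.Int.mod (p - x) p = p - x := by
    intro x hx
    obtain ⟨h1, h2⟩ := hmem x hx
    rw [PySem.Int.mod_eq_emod_of_pos (by omega)]
    exact Int.emod_eq_of_lt (by omega) (by omega)
  unfold pvValidA
  rw [List.all_eq_true]
  constructor
  · intro h x hx
    have h' := h x hx
    rw [hmod x hx] at h'
    simpa [PySem.Set.contains_iff] using h'
  · intro h x hx
    rw [hmod x hx]
    simpa [PySem.Set.contains_iff] using h x hx

theorem pvMem_iff (p : Int) (N : Nat) (hp1 : 2 * (N : Int) + 1 ≤ p) (hp2 : p ≤ 2 * (N : Int) + 2)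
    (S : List Int) :
    S ∈ (PySem.List.combinations (PySem.List.pyRange 1 p 1) N).filter (fun S => pvValidA p S)
      ↔ S ∈ (pvBV N).map (fun b => pvBuild p 1 b) := by
  have hpw := PySem.List.pairwise_lt_pyRange_one 1 p
  have hp0 : (0 : Int) < p := by omega
  constructor
  · intro hS
    rw [List.mem_filter] at hS
    obtain ⟨hSc, hSv⟩ := hS
    obtain ⟨hsub, hlen⟩ := (PySem.List.mem_combinations_iff _ _ _).mp hSc
    have hSpw : S.Pairwise (· < ·) := List.Pairwise.sublist hsub hpw
    have hmemb : ∀ x ∈ S, 1 ≤ x ∧ x < p := fun x hx =>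
      PySem.List.mem_pyRange_one.mp (hsub.subset hx)
    have hvalid : ∀ x ∈ S, p - x ∉ S := (pvValidA_iff p S hp0 hmemb).mp hSv
    set b := (List.range N).map (fun i : Nat => decide (((i : Int) + 1) ∈ S)) with hb
    have hblen : b.length = N := by simp [hb]
    have hbget : ∀ i : Nat, i < N → b[i]? = some (decide (((i : Int) + 1) ∈ S)) := by
      intro i hi
      simp [hb, hi]
    refine List.mem_map.mpr ⟨b, (pvBV_mem b N).mpr hblen, ?_⟩
    refine pvSortedExt (fun a b' hab hba => lt_irrefl a (lt_trans hab hba)) _ _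
      (pvBuild_sorted p N hp1 b 1 (le_refl 1) (by rw [hblen]; omega)) hSpw ?_
    intro x
    rw [pvBuild_mem]
    constructor
    · rintro (⟨i, hi, rfl⟩ | ⟨i, hi, rfl⟩)
      · have hiN : i < N := by
          have := (List.getElem?_eq_some_iff.mp hi).1; omega
        rw [hbget i hiN] at hi
        have hx : ((i : Int) + 1) ∈ S := by simpa using hi
        have : (1 : Int) + i = (i : Int) + 1 := by ring
        rwa [this]
      · have hiN : i < N := by
          have := (List.getElem?_eq_some_iff.mp hi).1; omega
        rw [hbget i hiN] at hi
        have hnot : ((i : Int) + 1) ∉ S := by simpa using hi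
        have hiN' : ((i : Int) + 1) ≤ (N : Int) := by exact_mod_cast by omega
        have := pvCount p N hp1 hp2 S hsub hlen hvalid ((i : Int) + 1) (by omega) hiN' hnot
        have he : p - (1 + (i : Int)) = p - ((i : Int) + 1) := by ring
        rwa [he]
    · intro hxS
      obtain ⟨hx1, hxp⟩ := hmemb x hxS
      by_cases hxN : x ≤ (N : Int)
      · left
        refine ⟨(x - 1).toNat, ?_, ?_⟩
        · have hcast : ((x - 1).toNat : Int) = x - 1 := Int.toNat_of_nonneg (by omega)
          rw [hbget _ (by omega)]
          congr 1
          rw [hcast]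
          simp [show x - 1 + 1 = x by ring, hxS]
        · have hcast : ((x - 1).toNat : Int) = x - 1 := Int.toNat_of_nonneg (by omega)
          omega
      · right
        have hmid : p - x ≠ x := fun h => hvalid x hxS (h.symm ▸ hxS)
        have hjS : p - x ∉ S := hvalid x hxS
        refine ⟨(p - x - 1).toNat, ?_, ?_⟩
        · have hcast : ((p - x - 1).toNat : Int) = p - x - 1 := Int.toNat_of_nonneg (by omega)
          rw [hbget _ (by omega)]
          congr 1
          rw [hcast]
          simp only [show p - x - 1 + 1 = p - x by ring]
          exact decide_eq_false hjS
        · have hcast : ((p - x - 1).toNat : Int) = p - x - 1 := Int.toNat_of_nonneg (by omega)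
          omega
  · intro hS
    rcases List.mem_map.mp hS with ⟨b, hbBV, rfl⟩
    have hblen : b.length = N := (pvBV_mem b N).mp hbBV
    have hsorted : (pvBuild p 1 b).Pairwise (· < ·) :=
      pvBuild_sorted p N hp1 b 1 (le_refl 1) (by rw [hblen]; omega)
    have hgetlt : ∀ {i : Nat} {t : Bool}, b[i]? = some t → i < N := by
      intro i t hi
      have := (List.getElem?_eq_some_iff.mp hi).1; omega
    have hmemb : ∀ x ∈ pvBuild p 1 b, 1 ≤ x ∧ x < p := by
      intro x hx
      have h := pvBuild_mem_cases hx
      rw [hblen] at h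
      constructor <;> omega
    rw [List.mem_filter]
    refine ⟨?_, ?_⟩
    · rw [PySem.List.mem_combinations_iff]
      refine ⟨pvSortedSublist _ _ hsorted hpw ?_, by rw [pvBuild_length, hblen]⟩
      intro x hx
      exact PySem.List.mem_pyRange_one.mpr ⟨(hmemb x hx).1, (hmemb x hx).2⟩
    · rw [pvValidA_iff p _ hp0 hmemb]
      intro x hx hcontra
      rcases (pvBuild_mem p x b 1).mp hx with ⟨i, hi, rfl⟩ | ⟨i, hi, rfl⟩ <;>
        rcases (pvBuild_mem p _ b 1).mp hcontra with ⟨i', hi', he⟩ | ⟨i', hi', he⟩ <;>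
          [skip; skip; skip; skip] <;>
          have hiN := hgetlt hi <;> have hiN' := hgetlt hi'
      · omega
      · have hii : i = i' := by omega
        subst hii
        rw [hi'] at hi
        simp at hi
      · have hii : i = i' := by omega
        subst hii
        rw [hi'] at hi
        simp at hi
      · omega

theorem pvA_eq (p : Int) : get_circulants p =
    ((PySem.List.combinations (PySem.List.pyRange 1 p 1) ((PySem.Int.floordiv (p - 1) 2).toNat)).filter
      (fun S => pvValidA p (PySem.Set.ofList S))).map (fun S => PySem.Set.ofList S) := by
  unfold get_circulants
  simp only []
  rw [PySem.List.foldl_append_if (fun S => pvValidA p (PySem.Set.ofList S))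
    (fun S => PySem.Set.ofList S), List.nil_append]

theorem pvB_eq (p : Int) : get_circulants_alt p =
    (pvBV ((PySem.Int.floordiv (p - 1) 2).toNat)).map
      (fun b => PySem.Set.ofList (pvBuild p 1 b)) := by
  unfold get_circulants_alt
  rw [pvGen_eq]
  simp only [List.nil_append]

-- ===== VERDICT (by name: the statement is the Claim_ definition above) =====
theorem get_circulants_spec : Claim_equal_get_circulants := by
  intro p _ hpre
  have hp : (1 : Int) ≤ p := hpre
  unfold Spec_get_circulants
  rw [pvA_eq, pvB_eq]
  set N : Nat := (PySem.Int.floordiv (p - 1) 2).toNat with hN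
  have hfd : PySem.Int.floordiv (p - 1) 2 = (p - 1) / 2 :=
    PySem.Int.floordiv_eq_ediv_of_pos (by omega)
  have hNint : (N : Int) = (p - 1) / 2 := by
    rw [hN, hfd]
    exact Int.toNat_of_nonneg (Int.ediv_nonneg (by omega) (by omega))
  have hp1 : 2 * (N : Int) + 1 ≤ p := by omega
  have hp2 : p ≤ 2 * (N : Int) + 2 := by omega
  have hpw := PySem.List.pairwise_lt_pyRange_one 1 p
  have hnodupA : ∀ S ∈ PySem.List.combinations (PySem.List.pyRange 1 p 1) N, S.Nodup := by
    intro S hS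
    have hsub := ((PySem.List.mem_combinations_iff _ _ _).mp hS).1
    exact (List.Pairwise.sublist hsub hpw).imp (fun h => ne_of_lt h)
  have hfc : (PySem.List.combinations (PySem.List.pyRange 1 p 1) N).filter
      (fun S => pvValidA p (PySem.Set.ofList S)) =
      (PySem.List.combinations (PySem.List.pyRange 1 p 1) N).filter (fun S => pvValidA p S) :=
    List.filter_congr (fun S hS => by rw [PySem.Set.ofList_eq_self_of_nodup S (hnodupA S hS)])
  rw [hfc]
  have hmapA : ((PySem.List.combinations (PySem.List.pyRange 1 p 1) N).filter
      (fun S => pvValidA p S)).map (fun S => PySem.Set.ofList S) =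
      (PySem.List.combinations (PySem.List.pyRange 1 p 1) N).filter (fun S => pvValidA p S) := by
    rw [List.map_congr_left (g := id)
      (fun S hS => PySem.Set.ofList_eq_self_of_nodup S (hnodupA S (List.mem_of_mem_filter hS)))]
    exact List.map_id _
  rw [hmapA]
  have hmapB : (pvBV N).map (fun b => PySem.Set.ofList (pvBuild p 1 b)) =
      (pvBV N).map (fun b => pvBuild p 1 b) :=
    List.map_congr_left (fun b hb => PySem.Set.ofList_eq_self_of_nodup _
      ((pvBuild_sorted p N hp1 b 1 (le_refl 1)
        (by rw [(pvBV_mem b N).mp hb]; omega)).imp (fun h => ne_of_lt h)))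
  rw [hmapB]
  apply pvSortedExt (fun a b hab hba => pvLex_asymm hab hba)
  · exact List.Pairwise.filter _ (pvCombs_pairwise _ hpw N)
  · have h := pvGenList_pairwise p N hp1 N [] (by simp)
    simpa using h
  · exact fun S => pvMem_iff p N hp1 hp2 S
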